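-- pv_equiv track=rewrite | github.com/TheStrudel/pycalc | pycalc.py | process_negative_numbers
-- ===== SOURCE A (Python) =====
-- from operator import add, sub, truediv, floordiv, mul, mod, pow, eq, ne, lt, gt, le, ge
--
-- ARITHMETICAL_OPERATIONS = {
--     '+': add, '-': sub, '*': mul, '/': truediv,
--     '//': floordiv, '%': mod, '^': pow, '-u': 0
-- }
--
-- def process_negative_numbers(expression: list) -> list:
--     """ Remove unnecessary sign tokens and replace unary minuses with '-u' token """
--     index = 0
--     minus_counter = 0
--     sign_counter = 0
--     while index < len(expression):
--         if expression[index] == '-':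
--             # Number of minuses and total number of signs encountered before token
--             minus_counter += 1
--             sign_counter += 1
--         elif expression[index] == '+':
--             sign_counter += 1
--         elif sign_counter != 0:
--             # Cut unnecessary signs from expression, leaving only one sign to later be edited ('--+-' -> '-')
--             expression = expression[:index - sign_counter + 1] + expression[index:]
--             index -= sign_counter
--             if minus_counter % 2 == 0:  # if number of minuses is even, replace remaining sign with plus
--                 expression[index] = '+'
--             else:  # Remaining sign could be +, so replace it with '-'
--                 expression[index] = '-'
--             # If there is an arithmetical operation, comma or a bracket before minus, change it to unary
--             if not index or expression[index-1] in ARITHMETICAL_OPERATIONS or \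
--                     expression[index-1] == '(' or expression[index-1] == ',':
--                 if expression[index] == '-':
--                     expression[index] = '-u'
--                 else:  # If expression[index] is not minus, than it is an unnecessary plus, e.g. in pow(+1, +2^+2)
--                     del expression[index]
--             sign_counter = 0
--             minus_counter = 0
--         index += 1
--     return expression
-- ===== SOURCE B (Python) =====
-- ARITHMETICAL_OPERATIONS_KEYS = ('+', '-', '*', '/', '//', '%', '^', '-u')
--
-- def process_negative_numbers(expression: list) -> list:
--     """ Remove unnecessary sign tokens and replace unary minuses with '-u' token.
--     Single forward pass: buffer each run of sign tokens, then on the next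
--     non-sign token emit the collapsed sign (or '-u' / nothing in unary position). """
--     out = []
--     pending = []  # current run of '+'/'-' tokens
--     for token in expression:
--         if token == '-' or token == '+':
--             pending.append(token)
--             continue
--         if pending:
--             negative = sum(1 for s in pending if s == '-') % 2 == 1
--             unary = (not out or out[-1] in ARITHMETICAL_OPERATIONS_KEYS
--                      or out[-1] == '(' or out[-1] == ',')
--             if negative:
--                 out.append('-u' if unary else '-')
--             elif not unary:
--                 out.append('+')
--             pending = []
--         out.append(token)
--     out.extend(pending)  # a trailing sign run is left untouched, as in the original
--     return out
-- ===== Notes on version B (the rewrite author's own statement) =====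
-- stated objective: faster
-- what changed: A repeatedly splices the list (slice-concatenate, in-place edits, delete) and rewinds its index after each sign run; B is a single forward pass that buffers each sign run and emits the collapsed token ('+'/'-'/'-u'/nothing) once, appending to a fresh output list.
import Mathlib
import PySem

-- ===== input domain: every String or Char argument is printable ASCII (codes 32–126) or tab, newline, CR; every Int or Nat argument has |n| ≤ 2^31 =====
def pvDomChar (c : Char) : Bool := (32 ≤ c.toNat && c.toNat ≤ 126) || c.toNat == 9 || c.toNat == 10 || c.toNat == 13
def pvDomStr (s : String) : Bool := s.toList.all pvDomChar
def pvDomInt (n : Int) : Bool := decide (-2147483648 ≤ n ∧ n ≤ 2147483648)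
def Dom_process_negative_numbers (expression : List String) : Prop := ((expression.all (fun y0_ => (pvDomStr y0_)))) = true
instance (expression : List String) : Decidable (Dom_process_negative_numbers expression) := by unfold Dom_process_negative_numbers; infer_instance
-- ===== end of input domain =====

-- B replaces A's quadratic in-place splice-and-rescan loop by a single forward pass that
-- buffers each sign run and emits the collapsed token once (objective: faster, asymptotic).
-- Neither implementation mutates the caller's list (A reassigns `expression` to a fresh
-- concatenation before any in-place edit).

-- ===== PORT A =====
-- keys of the module constant ARITHMETICAL_OPERATIONS; A only uses the dict for `in`
-- (key membership), its values are functions and play no role here.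
def pnOpKeysA : List String := ["+", "-", "*", "/", "//", "%", "^", "-u"]

-- A's while-loop, step for step.  `fuel` is a totalization device only: each iteration
-- consumes one unit, and a run never needs more than 2*len+1 iterations (each token is
-- visited at most twice).  Counters index/minus_counter/sign_counter are nonnegative
-- Python ints, carried as Nat; `index - sign_counter` never underflows in reachable
-- states (the sign run occupies indices index-sign_counter..index-1).
def pnLoopA (fuel : Nat) (expr : List String) (i mc sc : Nat) : List String :=
  match fuel with
  | 0 => expr
  | fuel + 1 =>
    if i < expr.length then
      let t := PySem.List.pyGetD expr (i : Int) ""   -- expression[index]; in range under the guard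
      if t = "-" then pnLoopA fuel expr (i + 1) (mc + 1) (sc + 1)
      else if t = "+" then pnLoopA fuel expr (i + 1) mc (sc + 1)
      else if sc ≠ 0 then
        -- expression = expression[:index - sign_counter + 1] + expression[index:]
        let expr1 := PySem.List.slice expr none (some ((i : Int) - (sc : Int) + 1)) ++
                     PySem.List.slice expr (some (i : Int)) none
        let i1 := i - sc                                -- index -= sign_counter
        let expr2 := PySem.List.pySetD expr1 (i1 : Int)
                       (if mc % 2 = 0 then "+" else "-")  -- expression[index] = '+' / '-'
        if i1 = 0 ∨ PySem.List.pyGetD expr2 ((i1 : Int) - 1) "" ∈ pnOpKeysA ∨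
            PySem.List.pyGetD expr2 ((i1 : Int) - 1) "" = "(" ∨
            PySem.List.pyGetD expr2 ((i1 : Int) - 1) "" = "," then
          if PySem.List.pyGetD expr2 (i1 : Int) "" = "-" then
            pnLoopA fuel (PySem.List.pySetD expr2 (i1 : Int) "-u") (i1 + 1) 0 0
          else
            pnLoopA fuel (expr2.eraseIdx i1) (i1 + 1) 0 0  -- del expression[index]; in range: exact
        else pnLoopA fuel expr2 (i1 + 1) 0 0
      else pnLoopA fuel expr (i + 1) mc sc
    else expr

def process_negative_numbers (expression : List String) : List String :=
  pnLoopA (2 * expression.length + 1) expression 0 0 0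

-- ===== PORT B =====
-- Source B's ARITHMETICAL_OPERATIONS_KEYS tuple holds the same strings as pnOpKeysA; shared here.
-- Source B's single forward pass: state (out, pending sign run), one step per token.
def pnLoopB (out pending : List String) : List String → List String
  | [] => out ++ pending             -- out.extend(pending): trailing sign run kept verbatim
  | t :: rest =>
    if t = "-" ∨ t = "+" then pnLoopB out (pending ++ [t]) rest
    else
      let out1 :=
        if pending ≠ [] then
          let negative := pending.countP (fun s => s == "-") % 2 = 1
          let unary := out = [] ∨ out.getLastD "" ∈ pnOpKeysA ∨
                       out.getLastD "" = "(" ∨ out.getLastD "" = ","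
          if negative then out ++ [if unary then "-u" else "-"]
          else if ¬ unary then out ++ ["+"] else out
        else out
      pnLoopB (out1 ++ [t]) [] rest

def process_negative_numbers_alt (expression : List String) : List String :=
  pnLoopB [] [] expression

-- ===== PRECONDITION & SPEC =====
def Spec_process_negative_numbers (expression : List String) (out : List String) : Prop := out = process_negative_numbers_alt expression
instance (expression : List String) (out : List String) : Decidable (Spec_process_negative_numbers expression out) := by unfold Spec_process_negative_numbers; infer_instance

-- ===== CLAIM (what is proved, stated in full; the proofs are below) =====
def Claim_equal_process_negative_numbers : Prop := ∀ (expression : List String), Dom_process_negative_numbers expression → Spec_process_negative_numbers expression (process_negative_numbers expression)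

-- ===== LEMMAS AND PROOFS =====

lemma pn_getD_mid {α : Type} (xs ys : List α) (t d : α) :
    (xs ++ t :: ys).getD xs.length d = t := by
  induction xs with
  | nil => rfl
  | cons x xs ih => simpa using ih

lemma pn_set_mid {α : Type} (xs ys : List α) (y v : α) :
    (xs ++ y :: ys).set xs.length v = xs ++ v :: ys := by
  induction xs with
  | nil => rfl
  | cons x xs ih => simpa using ih

lemma pn_erase_mid {α : Type} (xs ys : List α) (y : α) :
    (xs ++ y :: ys).eraseIdx xs.length = xs ++ ys := by
  induction xs with
  | nil => rfl
  | cons x xs ih => simpa using ih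

lemma pn_getD_last {α : Type} (xs ys : List α) (d : α) (h : xs ≠ []) :
    (xs ++ ys).getD (xs.length - 1) d = xs.getLastD d := by
  induction xs with
  | nil => simp at h
  | cons x xs ih =>
    cases xs with
    | nil => cases ys <;> rfl
    | cons z zs => simpa using ih (by simp)

set_option maxHeartbeats 2000000 in
lemma pn_main (rest : List String) : ∀ (out pending : List String) (fuel : Nat),
    (∀ s ∈ pending, s = "-" ∨ s = "+") →
    2 * rest.length ≤ fuel →
    pnLoopA fuel (out ++ pending ++ rest) (out.length + pending.length)
        (pending.countP (fun s => s == "-")) pending.length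
      = pnLoopB out pending rest := by
  induction rest with
  | nil =>
    intro out pending fuel hp hf
    cases fuel with
    | zero => simp [pnLoopA, pnLoopB]
    | succ f => simp [pnLoopA, pnLoopB]
  | cons t rest ih =>
    intro out pending fuel hp hf
    simp only [List.length_cons] at hf
    obtain ⟨f, rfl⟩ : ∃ f, fuel = f + 1 := ⟨fuel - 1, by omega⟩
    have hget : PySem.List.pyGetD (out ++ pending ++ t :: rest)
        ((out.length + pending.length : Nat) : Int) "" = t := by
      rw [PySem.List.pyGetD_natCast]
      simpa [List.append_assoc] using pn_getD_mid (out ++ pending) rest t ""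
    by_cases ht1 : t = "-"
    · -- sign token '-': absorbed into the run
      subst ht1
      rw [pnLoopA, if_pos (by simp)]
      simp only [hget, if_true, reduceIte]
      have hih := ih out (pending ++ ["-"]) f
        (fun s hs => by
          rcases List.mem_append.1 hs with h | h
          · exact hp s h
          · simp at h; subst h; left; rfl)
        (by omega)
      rw [pnLoopB]
      simp only [reduceIte, true_or, if_true]
      simp only [List.countP_append, List.length_append, List.countP_cons, List.countP_nil,
        List.length_cons, List.length_nil, List.append_assoc, List.cons_append,
        List.nil_append, List.singleton_append, Nat.add_assoc, beq_self_eq_true,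
        if_true, reduceIte, Nat.zero_add, Nat.add_zero] at hih ⊢
      exact hih
    · by_cases ht2 : t = "+"
      · -- sign token '+'
        subst ht2
        rw [pnLoopA, if_pos (by simp)]
        simp only [hget, if_true, reduceIte]
        have hih := ih out (pending ++ ["+"]) f
          (fun s hs => by
            rcases List.mem_append.1 hs with h | h
            · exact hp s h
            · simp at h; subst h; right; rfl)
          (by omega)
        rw [pnLoopB]
        simp only [reduceIte, or_true, if_true]
        simp only [List.countP_append, List.length_append, List.countP_cons, List.countP_nil,
          List.length_cons, List.length_nil, List.append_assoc, List.cons_append,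
          List.nil_append, List.singleton_append, Nat.add_assoc,
          if_true, reduceIte, Nat.zero_add, Nat.add_zero,
          show (("+" : String) == "-") = false by decide, if_false, Bool.false_eq_true] at hih ⊢
        exact hih
      · -- non-sign token
        rcases hpend : pending with _ | ⟨p, ps⟩
        · -- no pending signs: plain advance
          subst hpend
          rw [pnLoopA, if_pos (by simp)]
          simp only [hget]
          rw [if_neg ht1, if_neg ht2]
          rw [if_neg (by simp)]
          have hih := ih (out ++ [t]) [] f (by simp) (by omega)
          rw [pnLoopB]
          rw [if_neg (by tauto)]
          simp only [List.length_append, List.length_cons, List.length_nil, List.countP_nil,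
            Nat.add_zero, Nat.add_assoc, List.append_assoc, List.cons_append, List.nil_append,
            List.singleton_append, ne_eq, not_true_eq_false, reduceIte] at hih ⊢
          exact hih
        · -- pending = p :: ps : collapse the sign run, emit one token, rescan the operand
          subst hpend
          -- one extra A-iteration re-reads the operand after a collapse that keeps a sign
          have step2 : ∀ (out' : List String), 2 * rest.length + 1 ≤ f →
              pnLoopA f (out' ++ t :: rest) out'.length 0 0 = pnLoopB (out' ++ [t]) [] rest := by
            intro out' hf'
            obtain ⟨f', rfl⟩ : ∃ f', f = f' + 1 := ⟨f - 1, by omega⟩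
            rw [pnLoopA, if_pos (by simp)]
            have hg : PySem.List.pyGetD (out' ++ t :: rest) ((out'.length : Nat) : Int) "" = t := by
              rw [PySem.List.pyGetD_natCast]; simpa using pn_getD_mid out' rest t ""
            simp only [hg]
            rw [if_neg ht1, if_neg ht2]
            rw [if_neg (by simp)]
            have hih := ih (out' ++ [t]) [] f' (by simp) (by omega)
            simp only [List.length_append, List.length_cons, List.length_nil, List.countP_nil,
              Nat.add_zero, Nat.add_assoc, List.append_assoc, List.cons_append,
              List.nil_append] at hih ⊢
            exact hih
          rw [pnLoopA, if_pos (by simp)]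
          simp only [hget]
          rw [if_neg ht1, if_neg ht2]
          rw [if_pos (by simp : ((p :: ps).length ≠ 0))]
          have hslice1 : PySem.List.slice (out ++ p :: ps ++ t :: rest) none
              (some (((out.length + (p :: ps).length : Nat) : Int) - (((p :: ps).length : Nat) : Int) + 1)) =
              out ++ [p] := by
            rw [show (((out.length + (p :: ps).length : Nat) : Int) - (((p :: ps).length : Nat) : Int) + 1) =
                ((out.length + 1 : Nat) : Int) by push_cast; ring]
            rw [PySem.List.slice_to_natCast]
            rw [show out ++ p :: ps ++ t :: rest = (out ++ [p]) ++ (ps ++ t :: rest) by simp]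
            rw [List.take_append_of_le_length (by simp)]
            simp
          have hslice2 : PySem.List.slice (out ++ p :: ps ++ t :: rest)
              (some ((out.length + (p :: ps).length : Nat) : Int)) none = t :: rest := by
            rw [PySem.List.slice_from_natCast]
            rw [show out ++ p :: ps ++ t :: rest = (out ++ p :: ps) ++ t :: rest by simp]
            rw [show out.length + (p :: ps).length = (out ++ p :: ps).length by simp]
            simp
          rw [hslice1, hslice2]
          have hi1 : out.length + (p :: ps).length - (p :: ps).length = out.length := by omega
          rw [hi1]
          set s : String := if (p :: ps).countP (fun s => s == "-") % 2 = 0 then "+" else "-" with hs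
          have hset : PySem.List.pySetD ((out ++ [p]) ++ t :: rest) ((out.length : Nat) : Int) s =
              out ++ s :: t :: rest := by
            rw [PySem.List.pySetD_natCast]
            rw [show (out ++ [p]) ++ t :: rest = out ++ p :: t :: rest by simp]
            exact pn_set_mid out (t :: rest) p s
          rw [hset]
          have hmid : ∀ v : String, PySem.List.pyGetD (out ++ v :: t :: rest)
              ((out.length : Nat) : Int) "" = v := by
            intro v; rw [PySem.List.pyGetD_natCast]; simpa using pn_getD_mid out (t :: rest) v ""
          have hprev : out ≠ [] → PySem.List.pyGetD (out ++ s :: t :: rest)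
              (((out.length : Nat) : Int) - 1) "" = out.getLastD "" := by
            intro h
            have h1 : 1 ≤ out.length := List.length_pos_iff.2 h
            rw [show (((out.length : Nat) : Int) - 1) = ((out.length - 1 : Nat) : Int) by omega]
            rw [PySem.List.pyGetD_natCast]
            have := pn_getD_last out (s :: t :: rest) "" h
            simpa [List.getD] using this
          have hcond : (out.length = 0 ∨ PySem.List.pyGetD (out ++ s :: t :: rest)
                (((out.length : Nat) : Int) - 1) "" ∈ pnOpKeysA ∨
              PySem.List.pyGetD (out ++ s :: t :: rest) (((out.length : Nat) : Int) - 1) "" = "(" ∨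
              PySem.List.pyGetD (out ++ s :: t :: rest) (((out.length : Nat) : Int) - 1) "" = ",") ↔
              (out = [] ∨ out.getLastD "" ∈ pnOpKeysA ∨ out.getLastD "" = "(" ∨
               out.getLastD "" = ",") := by
            by_cases hout : out = []
            · subst hout; simp
            · rw [hprev hout]
              simp [List.length_eq_zero_iff]
          -- B's side: flush the run, then continue with the operand appended
          have hBstep : ∀ out1 : List String,
              (if ((p :: ps).countP (fun s => s == "-")) % 2 = 1 then
                  out ++ [if (out = [] ∨ out.getLastD "" ∈ pnOpKeysA ∨ out.getLastD "" = "(" ∨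
                      out.getLastD "" = ",") then "-u" else "-"]
                else if ¬ (out = [] ∨ out.getLastD "" ∈ pnOpKeysA ∨ out.getLastD "" = "(" ∨
                      out.getLastD "" = ",") then out ++ ["+"] else out) = out1 →
              pnLoopB out (p :: ps) (t :: rest) = pnLoopB (out1 ++ [t]) [] rest := by
            intro out1 h1
            rw [pnLoopB, if_neg (by tauto)]
            simp only [ne_eq, reduceCtorEq, not_false_eq_true, if_true, reduceIte, h1]
          by_cases hU : (out = [] ∨ out.getLastD "" ∈ pnOpKeysA ∨ out.getLastD "" = "(" ∨
              out.getLastD "" = ",")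
          · rw [if_pos (hcond.2 hU)]
            by_cases hpar : ((p :: ps).countP (fun s => s == "-")) % 2 = 0
            · -- even number of minuses in unary position: the '+' is deleted
              have hsv : s = "+" := by rw [hs, if_pos hpar]
              rw [hmid s, if_neg (by rw [hsv]; decide)]
              have herase : (out ++ s :: t :: rest).eraseIdx out.length = out ++ t :: rest :=
                pn_erase_mid out (t :: rest) s
              rw [herase]
              rw [hBstep out (by rw [if_neg (by omega), if_neg (by tauto)])]
              have hih := ih (out ++ [t]) [] f (by simp) (by omega)
              simp only [List.length_append, List.length_cons, List.length_nil, List.countP_nil,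
                Nat.add_zero, Nat.add_assoc, List.append_assoc, List.cons_append,
                List.nil_append] at hih ⊢
              exact hih
            · -- odd: the sign becomes '-u'
              have hsv : s = "-" := by rw [hs, if_neg hpar]
              rw [hmid s, if_pos hsv]
              have hset2 : PySem.List.pySetD (out ++ s :: t :: rest) ((out.length : Nat) : Int)
                  "-u" = out ++ "-u" :: t :: rest := by
                rw [PySem.List.pySetD_natCast]; exact pn_set_mid out (t :: rest) s "-u"
              rw [hset2]
              rw [hBstep (out ++ ["-u"]) (by rw [if_pos (by omega), if_pos hU])]
              have := step2 (out ++ ["-u"]) (by omega)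
              simpa [Nat.add_assoc] using this
          · rw [if_neg (fun h => hU (hcond.1 h))]
            by_cases hpar : ((p :: ps).countP (fun s => s == "-")) % 2 = 0
            · -- even, binary position: a single '+' remains
              have hsv : s = "+" := by rw [hs, if_pos hpar]
              rw [hBstep (out ++ ["+"]) (by rw [if_neg (by omega), if_pos hU])]
              rw [hsv]
              have := step2 (out ++ ["+"]) (by omega)
              simpa [Nat.add_assoc] using this
            · -- odd, binary position: a single '-' remains
              have hsv : s = "-" := by rw [hs, if_neg hpar]
              rw [hBstep (out ++ ["-"]) (by rw [if_pos (by omega), if_neg hU])]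
              rw [hsv]
              have := step2 (out ++ ["-"]) (by omega)
              simpa [Nat.add_assoc] using this

-- ===== VERDICT (by name: the statement is the Claim_ definition above) =====
theorem process_negative_numbers_spec : Claim_equal_process_negative_numbers := by
  intro expression _
  unfold Spec_process_negative_numbers process_negative_numbers process_negative_numbers_alt
  simpa using pn_main expression [] [] (2 * expression.length + 1) (by simp) (by omega)
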